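-- pv_equiv track=rewrite | github.com/saurabhtanna/pyTools | Maya2023/playblastTool/ffmpegUtils.py | vidMatrix
-- ===== SOURCE A (Python) =====
-- def vidMatrix(numOfInput=2):
--     """
--     Calculate  a
--     :param numOfInput:
--     :return:
--     """
--     xCells = 2
--     yCells = 2
--     while numOfInput > xCells * yCells:
--         if xCells <= yCells:
--             xCells += 1
--         else:
--             yCells += 1
--     return xCells, yCells
-- ===== SOURCE B (Python) =====
-- def vidMatrix(numOfInput=2):
--     # O(log n): binary-search the ceiling square root instead of walking the grid sizes.
--     if numOfInput <= 4:
--         return 2, 2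
--     lo, hi = 1, numOfInput
--     while lo < hi:
--         mid = (lo + hi) // 2
--         if mid * mid >= numOfInput:
--             hi = mid
--         else:
--             lo = mid + 1
--     x = lo
--     y = x - 1 if x * (x - 1) >= numOfInput else x
--     return x, y
-- ===== Notes on version B (the rewrite author's own statement) =====
-- stated objective: faster
-- what changed: Replaces the step-by-step grid-growing loop with a binary search for the ceiling square root plus an O(1) choice of the smaller side.
import Mathlib
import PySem

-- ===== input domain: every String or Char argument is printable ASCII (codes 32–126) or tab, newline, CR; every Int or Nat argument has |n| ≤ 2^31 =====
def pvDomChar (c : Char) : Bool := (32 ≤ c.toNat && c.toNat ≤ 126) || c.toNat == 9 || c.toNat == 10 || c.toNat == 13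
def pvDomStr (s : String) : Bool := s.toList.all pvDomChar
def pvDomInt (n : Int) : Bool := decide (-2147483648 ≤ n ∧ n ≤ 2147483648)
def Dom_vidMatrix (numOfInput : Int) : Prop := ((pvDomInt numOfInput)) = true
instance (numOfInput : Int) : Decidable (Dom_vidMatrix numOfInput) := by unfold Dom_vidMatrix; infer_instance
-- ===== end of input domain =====

-- B replaces A's step-by-step grid-growing loop by a binary search for the ceiling
-- square root plus an O(1) choice of the smaller side (objective: faster).
-- Both loops carry a Nat fuel equal to their termination measure — a pure totality
-- guard (proved sufficient below), not part of either algorithm.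

-- ===== PORT A =====
-- the while loop of A: grow the smaller side until the grid holds numOfInput
def vidMatrixLoop : Nat → Int → Int → Int → Int × Int
  | 0, _, x, y => (x, y)
  | fuel + 1, n, x, y =>
    if n > x * y then
      if x ≤ y then vidMatrixLoop fuel n (x + 1) y else vidMatrixLoop fuel n x (y + 1)
    else (x, y)

def vidMatrix (numOfInput : Int) : Int × Int :=
  vidMatrixLoop (numOfInput - 2 * 2).toNat numOfInput 2 2

-- ===== PORT B =====
-- B's while loop: binary search for the least x with x*x ≥ n on [lo, hi]
def vmBsearch : Nat → Int → Int → Int → Int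
  | 0, _, lo, _ => lo
  | fuel + 1, n, lo, hi =>
    if lo < hi then
      let mid := PySem.Int.floordiv (lo + hi) 2
      if mid * mid ≥ n then vmBsearch fuel n lo mid else vmBsearch fuel n (mid + 1) hi
    else lo

def vidMatrix_alt (numOfInput : Int) : Int × Int :=
  if numOfInput ≤ 4 then (2, 2)
  else
    let x := vmBsearch (numOfInput - 1).toNat numOfInput 1 numOfInput
    let y := if x * (x - 1) ≥ numOfInput then x - 1 else x
    (x, y)

-- ===== PRECONDITION & SPEC =====
def Spec_vidMatrix (numOfInput : Int) (out : Int × Int) : Prop := out = vidMatrix_alt numOfInput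
instance (numOfInput : Int) (out : Int × Int) : Decidable (Spec_vidMatrix numOfInput out) := by unfold Spec_vidMatrix; infer_instance

-- ===== CLAIM (what is proved, stated in full; the proofs are below) =====
def Claim_equal_vidMatrix : Prop := ∀ (numOfInput : Int), Dom_vidMatrix numOfInput → Spec_vidMatrix numOfInput (vidMatrix numOfInput)

-- ===== LEMMAS AND PROOFS =====

-- the pair (X, Y) A's loop stops at, characterised without running the loop
def vmGood (n X Y : Int) : Prop :=
  2 ≤ Y ∧ Y ≤ X ∧ X ≤ Y + 1 ∧ n ≤ X * Y ∧
  (X = Y → X * (X - 1) < n) ∧ (X = Y + 1 → Y * Y < n)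

-- A's loop, started inside the invariant with enough fuel, stops at a good pair
theorem vidMatrixLoop_good (fuel : Nat) (n x y : Int) (h2 : 2 ≤ y) (hyx : y ≤ x)
    (hxy : x ≤ y + 1) (hd : x = y → x * (x - 1) < n) (ho : x = y + 1 → y * y < n)
    (hf : (n - x * y).toNat ≤ fuel) :
    vmGood n (vidMatrixLoop fuel n x y).1 (vidMatrixLoop fuel n x y).2 := by
  induction fuel generalizing x y with
  | zero =>
    exact ⟨h2, hyx, hxy, by show n ≤ x * y; omega, hd, ho⟩
  | succ fuel ih =>
    rw [vidMatrixLoop]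
    split_ifs with hrun hle
    · -- x ≤ y, so x = y; grow x
      have hxeq : x = y := by omega
      have hd' : x + 1 = y → (x + 1) * (x + 1 - 1) < n := by omega
      have ho' : x + 1 = y + 1 → y * y < n := by
        intro _; have : y * y = x * y := by rw [hxeq]
        omega
      have hstep : (x + 1) * y = x * y + y := by ring
      exact ih (x + 1) y h2 (by omega) (by omega) hd' ho' (by omega)
    · -- y < x, so x = y + 1; grow y
      have hxeq : x = y + 1 := by omega
      have hd' : x = y + 1 → x * (x - 1) < n := by
        intro _; have : x * (x - 1) = x * y := by rw [hxeq]; ring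
        omega
      have hstep : x * (y + 1) = x * y + x := by ring
      exact ih x (y + 1) (by omega) (by omega) (by omega) hd' (by omega) (by omega)
    · exact ⟨h2, hyx, hxy, by show n ≤ x * y; omega, hd, ho⟩

-- binary-search invariant: with enough fuel the result r satisfies (r-1)^2 < n ≤ r^2, 1 ≤ r
theorem vmBsearch_good (fuel : Nat) (n lo hi : Int) (h1 : 1 ≤ lo) (hlh : lo ≤ hi)
    (hlo : (lo - 1) * (lo - 1) < n) (hhi : n ≤ hi * hi) (hf : (hi - lo).toNat ≤ fuel) :
    1 ≤ vmBsearch fuel n lo hi ∧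
      (vmBsearch fuel n lo hi - 1) * (vmBsearch fuel n lo hi - 1) < n ∧
      n ≤ vmBsearch fuel n lo hi * vmBsearch fuel n lo hi := by
  induction fuel generalizing lo hi with
  | zero =>
    have h : lo = hi := by omega
    exact ⟨h1, hlo, by rw [vmBsearch]; nlinarith⟩
  | succ fuel ih =>
    rw [vmBsearch]
    by_cases hlt : lo < hi
    · have hb := PySem.Int.floordiv_two_mid_bounds (lo := lo) (hi := hi) (by omega)
      have hmlt : PySem.Int.floordiv (lo + hi) 2 < hi := by
        rw [PySem.Int.floordiv_lt_iff_lt_mul (by omega)]; omega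
      rw [if_pos hlt]
      by_cases hge : PySem.Int.floordiv (lo + hi) 2 * PySem.Int.floordiv (lo + hi) 2 ≥ n
      · rw [if_pos hge]
        exact ih lo _ h1 (by omega) hlo hge (by omega)
      · rw [if_neg hge]
        exact ih _ hi (by omega) (by omega) (by simpa using not_le.mp hge) hhi (by omega)
    · rw [if_neg hlt]
      exact ⟨h1, hlo, by nlinarith⟩

-- a good pair is unique, and it is exactly the pair B builds from the ceiling root
theorem vmGood_unique (n X Y x : Int) (hn : 4 < n) (hg : vmGood n X Y)
    (hx1 : 1 ≤ x) (hxl : (x - 1) * (x - 1) < n) (hxu : n ≤ x * x) :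
    (X, Y) = (x, if x * (x - 1) ≥ n then x - 1 else x) := by
  obtain ⟨h2, hyx, hxy, hle, hd, ho⟩ := hg
  have hx3 : 3 ≤ x := by nlinarith
  split_ifs with hc
  · -- good pair must be (x, x-1)
    have hX : X = x := by
      rcases eq_or_lt_of_le hyx with he | hlt
      · have h1 := hd he.symm
        by_contra hne
        rcases lt_or_gt_of_ne hne with hlt2 | hgt
        · have : X * X ≤ (x - 1) * (x - 1) := by nlinarith
          nlinarith [he ▸ hle]
        · have : x * (x - 1) ≤ X * (X - 1) := by nlinarith
          omega
      · have hX : X = Y + 1 := by omega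
        have h1 := ho hX
        by_contra hne
        rcases lt_or_gt_of_ne hne with hlt2 | hgt
        · have : X * Y ≤ (x - 1) * (x - 1) := by nlinarith
          omega
        · have : x * (x - 1) ≤ Y * Y := by nlinarith
          omega
    subst hX
    have hY : Y = X - 1 := by
      rcases eq_or_lt_of_le hyx with he | hlt
      · exfalso; have := hd he.symm; omega
      · omega
    simp [hY]
  · -- x*(x-1) < n: good pair must be (x, x)
    push Not at hc
    have hX : X = x := by
      by_contra hne
      rcases lt_or_gt_of_ne hne with hlt2 | hgt
      · have : X * Y ≤ (x - 1) * (x - 1) := by nlinarith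
        omega
      · rcases eq_or_lt_of_le hyx with he | hlt
        · have h1 := hd he.symm
          have : x * x ≤ X * (X - 1) := by nlinarith
          nlinarith
        · have hXe : X = Y + 1 := by omega
          have h1 := ho hXe
          have : x * x ≤ Y * Y := by nlinarith
          nlinarith
    subst hX
    have hY : Y = X := by
      rcases eq_or_lt_of_le hyx with he | hlt
      · omega
      · exfalso; have hXe : X = Y + 1 := by omega
        have := ho hXe
        have hYe : Y = X - 1 := by omega
        nlinarith [hYe ▸ this]
    simp [hY]

-- ===== VERDICT (by name: the statement is the Claim_ definition above) =====
theorem vidMatrix_spec : Claim_equal_vidMatrix := by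
  intro n _
  unfold Spec_vidMatrix vidMatrix vidMatrix_alt
  by_cases hn : n ≤ 4
  · have hz : (n - 2 * 2).toNat = 0 := by omega
    rw [hz, vidMatrixLoop]
    simp [hn]
  · push Not at hn
    simp only [not_le.mpr hn, if_false]
    have hg := vidMatrixLoop_good (n - 2 * 2).toNat n 2 2 (by omega) (by omega) (by omega)
      (by intro _; omega) (by omega) (by omega)
    have hb := vmBsearch_good (n - 1).toNat n 1 n (by omega) (by omega) (by omega)
      (by nlinarith) (by omega)
    have := vmGood_unique n (vidMatrixLoop (n - 2 * 2).toNat n 2 2).1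
      (vidMatrixLoop (n - 2 * 2).toNat n 2 2).2
      (vmBsearch (n - 1).toNat n 1 n) hn hg hb.1 hb.2.1 hb.2.2
    simpa using this
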